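-- pv_equiv track=rewrite | github.com/dmcomm/irplot | decode.py | redundancyBits
-- ===== SOURCE A (Python) =====
-- def redundancyBits(x):
--     result = 0x79B4
--     mask = 0x19D8
--     for i in range(16):
--         if x & 1:
--             result ^= mask
--         x >>= 1
--         mask <<= 1
--         if mask >= 0x10000:
--             mask ^= 0x10811
--     return result
-- ===== SOURCE B (Python) =====
-- # Table-driven: the redundancy function is affine over GF(2), so the result is
-- # the seed XORed with one precomputed entry per 4-bit nibble of x.
-- _RB_TABLE_0 = (0x0000, 0x19D8, 0x33B0, 0x2A68, 0x6760, 0x7EB8, 0x54D0, 0x4D08,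
--                0xCEC0, 0xD718, 0xFD70, 0xE4A8, 0xA9A0, 0xB078, 0x9A10, 0x83C8)
-- _RB_TABLE_1 = (0x0000, 0x9591, 0x2333, 0xB6A2, 0x4666, 0xD3F7, 0x6555, 0xF0C4,
--                0x8CCC, 0x195D, 0xAFFF, 0x3A6E, 0xCAAA, 0x5F3B, 0xE999, 0x7C08)
-- _RB_TABLE_2 = (0x0000, 0x1189, 0x2312, 0x329B, 0x4624, 0x57AD, 0x6536, 0x74BF,
--                0x8C48, 0x9DC1, 0xAF5A, 0xBED3, 0xCA6C, 0xDBE5, 0xE97E, 0xF8F7)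
-- _RB_TABLE_3 = (0x0000, 0x1081, 0x2102, 0x3183, 0x4204, 0x5285, 0x6306, 0x7387,
--                0x8408, 0x9489, 0xA50A, 0xB58B, 0xC60C, 0xD68D, 0xE70E, 0xF78F)
--
-- def redundancyBits(x):
--     return (0x79B4
--             ^ _RB_TABLE_0[x & 15]
--             ^ _RB_TABLE_1[(x >> 4) & 15]
--             ^ _RB_TABLE_2[(x >> 8) & 15]
--             ^ _RB_TABLE_3[(x >> 12) & 15])
-- ===== Notes on version B (the rewrite author's own statement) =====
-- stated objective: alternative
-- what changed: Replaces A's sixteen-iteration bit-serial LFSR loop by a loop-free table-driven computation: four precomputed sixteen-entry nibble tables (exploiting GF(2)-linearity of the code) combined with four XORs.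
import Mathlib
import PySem

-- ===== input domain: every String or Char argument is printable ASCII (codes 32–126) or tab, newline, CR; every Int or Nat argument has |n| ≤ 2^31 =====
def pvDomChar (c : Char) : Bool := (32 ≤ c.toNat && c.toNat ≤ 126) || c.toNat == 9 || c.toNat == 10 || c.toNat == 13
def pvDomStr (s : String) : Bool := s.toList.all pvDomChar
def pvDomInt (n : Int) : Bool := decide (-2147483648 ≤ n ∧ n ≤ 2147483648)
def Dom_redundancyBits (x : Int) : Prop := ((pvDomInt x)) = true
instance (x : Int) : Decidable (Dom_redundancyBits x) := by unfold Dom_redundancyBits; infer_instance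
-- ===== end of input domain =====

-- B replaces A's 16-iteration bit-serial loop by a loop-free table-driven computation
-- (four precomputed 16-entry nibble tables combined with XOR); equivalence proved below.


-- ===== PORT A =====
-- one fused loop over range(16) carrying (result, x, mask)
def redundancyBitsStep (s : Int × Int × Int) (_ : Nat) : Int × Int × Int :=
  let result := if PySem.Int.band s.2.1 1 ≠ 0 then PySem.Int.bxor s.1 s.2.2 else s.1
  let x := s.2.1 >>> (1:Nat)
  let mask := s.2.2 <<< (1:Nat)
  let mask := if mask ≥ 0x10000 then PySem.Int.bxor mask 0x10811 else mask
  (result, x, mask)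

def redundancyBits (x : Int) : Int :=
  ((List.range 16).foldl redundancyBitsStep (0x79B4, x, 0x19D8)).1

-- ===== PORT B =====
-- four precomputed nibble tables (literal constants in Source B)
def rbT0 : List Int := [0x0000, 0x19D8, 0x33B0, 0x2A68, 0x6760, 0x7EB8, 0x54D0, 0x4D08,
                        0xCEC0, 0xD718, 0xFD70, 0xE4A8, 0xA9A0, 0xB078, 0x9A10, 0x83C8]
def rbT1 : List Int := [0x0000, 0x9591, 0x2333, 0xB6A2, 0x4666, 0xD3F7, 0x6555, 0xF0C4,
                        0x8CCC, 0x195D, 0xAFFF, 0x3A6E, 0xCAAA, 0x5F3B, 0xE999, 0x7C08]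
def rbT2 : List Int := [0x0000, 0x1189, 0x2312, 0x329B, 0x4624, 0x57AD, 0x6536, 0x74BF,
                        0x8C48, 0x9DC1, 0xAF5A, 0xBED3, 0xCA6C, 0xDBE5, 0xE97E, 0xF8F7]
def rbT3 : List Int := [0x0000, 0x1081, 0x2102, 0x3183, 0x4204, 0x5285, 0x6306, 0x7387,
                        0x8408, 0x9489, 0xA50A, 0xB58B, 0xC60C, 0xD68D, 0xE70E, 0xF78F]

def redundancyBits_alt (x : Int) : Int :=
  PySem.Int.bxor (PySem.Int.bxor (PySem.Int.bxor (PySem.Int.bxor 0x79B4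
    (PySem.List.pyGetD rbT0 (PySem.Int.band x 15) 0))
    (PySem.List.pyGetD rbT1 (PySem.Int.band (x >>> (4:Nat)) 15) 0))
    (PySem.List.pyGetD rbT2 (PySem.Int.band (x >>> (8:Nat)) 15) 0))
    (PySem.List.pyGetD rbT3 (PySem.Int.band (x >>> (12:Nat)) 15) 0)

-- ===== PRECONDITION & SPEC =====
def Spec_redundancyBits (x : Int) (out : Int) : Prop := out = redundancyBits_alt x
instance (x : Int) (out : Int) : Decidable (Spec_redundancyBits x out) := by unfold Spec_redundancyBits; infer_instance

-- ===== CLAIM (what is proved, stated in full; the proofs are below) =====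
def Claim_equal_redundancyBits : Prop := ∀ (x : Int), Dom_redundancyBits x → Spec_redundancyBits x (redundancyBits x)

-- ===== LEMMAS AND PROOFS =====

-- the mask-update step of A's loop
def rbMaskNext (m : Int) : Int :=
  if m <<< (1:Nat) ≥ 0x10000 then PySem.Int.bxor (m <<< (1:Nat)) 0x10811 else m <<< (1:Nat)

-- the sequence of masks A's loop generates
def rbMasks : Nat → Int → List Int
  | 0, _ => []
  | n + 1, m => m :: rbMasks n (rbMaskNext m)

-- that sequence, fully evaluated
def rbM : List Int := [0x19D8, 0x33B0, 0x6760, 0xCEC0, 0x9591, 0x2333, 0x4666, 0x8CCC,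
                       0x1189, 0x2312, 0x4624, 0x8C48, 0x1081, 0x2102, 0x4204, 0x8408]

-- A's fused loop, characterised as a bit-indexed selection over its mask sequence
theorem rbMain (n : Nat) (r x m : Int) :
    ((List.range n).foldl redundancyBitsStep (r, x, m)).1 =
    (List.range n).foldl
      (fun (result : Int) (i : Nat) => if PySem.Int.band (x >>> i) 1 ≠ 0 then PySem.Int.bxor result ((rbMasks n m).getD i 0) else result) r := by
  induction n generalizing r x m with
  | zero => rfl
  | succ n ih =>
      rw [List.range_succ_eq_map]
      simp only [List.foldl_cons, List.foldl_map, Nat.succ_eq_add_one]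
      have h1 : redundancyBitsStep (r, x, m) 0
          = ((if PySem.Int.band x 1 ≠ 0 then PySem.Int.bxor r m else r), x >>> (1:Nat), rbMaskNext m) := by
        simp [redundancyBitsStep, rbMaskNext]
      have hstep : ∀ (s : Int × Int × Int),
          (List.range n).foldl (fun s (i : Nat) => redundancyBitsStep s (i+1)) s
          = (List.range n).foldl redundancyBitsStep s := by
        intro s; apply PySem.List.foldl_congr_mem; intro b a _; rfl
      have hx0 : x >>> (0:Nat) = x := Int.shiftRight_zero x
      have hget : ∀ i : Nat, (rbMasks (n+1) m).getD (i+1) 0 = (rbMasks n (rbMaskNext m)).getD i 0 := by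
        intro i; simp [rbMasks]
      have hsh : ∀ i : Nat, x >>> (i+1) = (x >>> (1:Nat)) >>> i := by
        intro i; rw [show i + 1 = 1 + i by omega, Int.shiftRight_add]
      have hget0 : (rbMasks (n+1) m).getD 0 0 = m := by simp [rbMasks]
      rw [h1, hstep, ih]
      simp only [hx0, hget0, hget, ← hsh]

-- x & 15 is the low nibble (Python &, two's complement, any sign)
theorem rb_band15 (z : Int) : PySem.Int.band z 15 = z % 16 := by
  have hand : ∀ n : Nat, n &&& 15 = n % 16 := fun n => by
    have h := Nat.and_two_pow_sub_one_eq_mod n 4; norm_num at h; exact h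
  by_cases h : 0 ≤ z
  · rw [PySem.Int.band_of_nonneg h (by norm_num)]
    have := hand z.toNat
    have h15 : (15 : Int).toNat = 15 := rfl
    rw [h15]
    omega
  · simp only [PySem.Int.band]
    rw [if_neg h, if_pos (by norm_num : (0:Int) ≤ 15)]
    have h15 : (15 : Int).toNat = 15 := rfl
    rw [h15]
    have := hand (-z - 1).toNat
    rw [Nat.and_comm] at this
    omega

theorem rb_bxor_nonneg {a b : Int} (ha : 0 ≤ a) (hb : 0 ≤ b) : 0 ≤ PySem.Int.bxor a b := by
  rw [PySem.Int.bxor_of_nonneg ha hb]; positivity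

-- XOR-ing two nonnegative constants in sequence = XOR-ing their XOR (any accumulator)
theorem rb_assoc2 (r : Int) {a b : Int} (ha : 0 ≤ a) (hb : 0 ≤ b) :
    PySem.Int.bxor (PySem.Int.bxor r a) b = PySem.Int.bxor r (PySem.Int.bxor a b) := by
  rw [PySem.Int.bxor_of_nonneg ha hb]
  by_cases hr : 0 ≤ r
  · rw [PySem.Int.bxor_of_nonneg hr ha,
        PySem.Int.bxor_of_nonneg (by positivity) hb,
        PySem.Int.bxor_of_nonneg hr (by positivity)]
    have e1 : ((a.toNat ^^^ b.toNat : Nat) : Int).toNat = a.toNat ^^^ b.toNat := by omega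
    have e2 : ((r.toNat ^^^ a.toNat : Nat) : Int).toNat = r.toNat ^^^ a.toNat := by omega
    rw [e1, e2, Nat.xor_assoc]
  · have e0 : PySem.Int.bxor r a = -(((-r - 1).toNat ^^^ a.toNat : Nat) : Int) - 1 := by
      simp only [PySem.Int.bxor]; rw [if_neg hr, if_pos ha]
    have e1 : PySem.Int.bxor (-(((-r - 1).toNat ^^^ a.toNat : Nat) : Int) - 1) b
        = -((((-r - 1).toNat ^^^ a.toNat) ^^^ b.toNat : Nat) : Int) - 1 := by
      simp only [PySem.Int.bxor]
      rw [if_neg (by omega), if_pos hb]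
      have h2 : (-(-((((-r - 1).toNat ^^^ a.toNat : Nat)) : Int) - 1) - 1).toNat
          = (-r - 1).toNat ^^^ a.toNat := by omega
      rw [h2]
    have e2 : PySem.Int.bxor r ((a.toNat ^^^ b.toNat : Nat) : Int)
        = -(((-r - 1).toNat ^^^ (a.toNat ^^^ b.toNat) : Nat) : Int) - 1 := by
      simp only [PySem.Int.bxor]
      rw [if_neg hr, if_pos (by positivity)]
      have h3 : (((a.toNat ^^^ b.toNat : Nat) : Int)).toNat = a.toNat ^^^ b.toNat := by omega
      rw [h3]
    rw [e0, e1, e2, Nat.xor_assoc]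

theorem rb_assoc3 (r : Int) {a b c : Int} (ha : 0 ≤ a) (hb : 0 ≤ b) (hc : 0 ≤ c) :
    PySem.Int.bxor (PySem.Int.bxor (PySem.Int.bxor r a) b) c
      = PySem.Int.bxor r (PySem.Int.bxor (PySem.Int.bxor a b) c) := by
  rw [rb_assoc2 r ha hb, rb_assoc2 r (rb_bxor_nonneg ha hb) hc]

theorem rb_assoc4 (r : Int) {a b c d : Int} (ha : 0 ≤ a) (hb : 0 ≤ b) (hc : 0 ≤ c) (hd : 0 ≤ d) :
    PySem.Int.bxor (PySem.Int.bxor (PySem.Int.bxor (PySem.Int.bxor r a) b) c) d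
      = PySem.Int.bxor r (PySem.Int.bxor (PySem.Int.bxor (PySem.Int.bxor a b) c) d) := by
  rw [rb_assoc3 r ha hb hc, rb_assoc2 r (rb_bxor_nonneg (rb_bxor_nonneg ha hb) hc) hd]

-- A's steps 0..3 collapse to one lookup in table rbT0
theorem rbChunk0 (x r : Int) :
    ([0,1,2,3] : List Nat).foldl
      (fun (result : Int) (i : Nat) => if PySem.Int.band (x >>> i) 1 ≠ 0 then PySem.Int.bxor result (rbM.getD i 0) else result) r
    = PySem.Int.bxor r (PySem.List.pyGetD rbT0 (PySem.Int.band x 15) 0) := by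
  simp only [List.foldl_cons, List.foldl_nil,
    show rbM.getD 0 0 = (0x19d8:Int) from rfl, show rbM.getD 1 0 = (0x33b0:Int) from rfl, show rbM.getD 2 0 = (0x6760:Int) from rfl, show rbM.getD 3 0 = (0xcec0:Int) from rfl]
  have c0 : PySem.Int.band (x >>> (0:Nat)) 1 = x % 16 % 2 := by
    rw [PySem.Int.band_one, PySem.Int.mod_eq_emod_of_pos (by norm_num), Int.shiftRight_eq_div_pow,
        show ((2^0:Nat):Int) = 1 from by norm_num]
    omega
  have c1 : PySem.Int.band (x >>> (1:Nat)) 1 = x % 16 / 2 % 2 := by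
    rw [PySem.Int.band_one, PySem.Int.mod_eq_emod_of_pos (by norm_num), Int.shiftRight_eq_div_pow,
        show ((2^1:Nat):Int) = 2 from by norm_num]
    omega
  have c2 : PySem.Int.band (x >>> (2:Nat)) 1 = x % 16 / 4 % 2 := by
    rw [PySem.Int.band_one, PySem.Int.mod_eq_emod_of_pos (by norm_num), Int.shiftRight_eq_div_pow,
        show ((2^2:Nat):Int) = 4 from by norm_num]
    omega
  have c3 : PySem.Int.band (x >>> (3:Nat)) 1 = x % 16 / 8 % 2 := by
    rw [PySem.Int.band_one, PySem.Int.mod_eq_emod_of_pos (by norm_num), Int.shiftRight_eq_div_pow,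
        show ((2^3:Nat):Int) = 8 from by norm_num]
    omega
  have ci : PySem.Int.band x 15 = x % 16 := rb_band15 x
  simp only [c0, c1, c2, c3, ci]
  have h1 : 0 ≤ x % 16 := Int.emod_nonneg _ (by norm_num)
  have h2 : x % 16 < 16 := Int.emod_lt_of_pos _ (by norm_num)
  generalize x % 16 = n at h1 h2 ⊢
  interval_cases n <;> norm_num <;>
    first
      | (rw [show PySem.List.pyGetD rbT0 (0:Int) 0 = (0:Int) from by decide, PySem.Int.bxor_zero])
      | (exact congrArg (PySem.Int.bxor r) (by decide))
      | (rw [rb_assoc2 r (by norm_num) (by norm_num)]; exact congrArg (PySem.Int.bxor r) (by decide))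
      | (rw [rb_assoc3 r (by norm_num) (by norm_num) (by norm_num)]; exact congrArg (PySem.Int.bxor r) (by decide))
      | (rw [rb_assoc4 r (by norm_num) (by norm_num) (by norm_num) (by norm_num)]; exact congrArg (PySem.Int.bxor r) (by decide))

-- A's steps 4..7 collapse to one lookup in table rbT1
theorem rbChunk1 (x r : Int) :
    ([4,5,6,7] : List Nat).foldl
      (fun (result : Int) (i : Nat) => if PySem.Int.band (x >>> i) 1 ≠ 0 then PySem.Int.bxor result (rbM.getD i 0) else result) r
    = PySem.Int.bxor r (PySem.List.pyGetD rbT1 (PySem.Int.band (x >>> (4:Nat)) 15) 0) := by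
  simp only [List.foldl_cons, List.foldl_nil,
    show rbM.getD 4 0 = (0x9591:Int) from rfl, show rbM.getD 5 0 = (0x2333:Int) from rfl, show rbM.getD 6 0 = (0x4666:Int) from rfl, show rbM.getD 7 0 = (0x8ccc:Int) from rfl]
  have c0 : PySem.Int.band (x >>> (4:Nat)) 1 = x / 16 % 16 % 2 := by
    rw [PySem.Int.band_one, PySem.Int.mod_eq_emod_of_pos (by norm_num), Int.shiftRight_eq_div_pow,
        show ((2^4:Nat):Int) = 16 from by norm_num]
    omega
  have c1 : PySem.Int.band (x >>> (5:Nat)) 1 = x / 16 % 16 / 2 % 2 := by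
    rw [PySem.Int.band_one, PySem.Int.mod_eq_emod_of_pos (by norm_num), Int.shiftRight_eq_div_pow,
        show ((2^5:Nat):Int) = 32 from by norm_num]
    omega
  have c2 : PySem.Int.band (x >>> (6:Nat)) 1 = x / 16 % 16 / 4 % 2 := by
    rw [PySem.Int.band_one, PySem.Int.mod_eq_emod_of_pos (by norm_num), Int.shiftRight_eq_div_pow,
        show ((2^6:Nat):Int) = 64 from by norm_num]
    omega
  have c3 : PySem.Int.band (x >>> (7:Nat)) 1 = x / 16 % 16 / 8 % 2 := by
    rw [PySem.Int.band_one, PySem.Int.mod_eq_emod_of_pos (by norm_num), Int.shiftRight_eq_div_pow,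
        show ((2^7:Nat):Int) = 128 from by norm_num]
    omega
  have ci : PySem.Int.band (x >>> (4:Nat)) 15 = x / 16 % 16 := by
    rw [Int.shiftRight_eq_div_pow, show ((2^4:Nat):Int) = 16 from by norm_num, rb_band15]
  simp only [c0, c1, c2, c3, ci]
  have h1 : 0 ≤ x / 16 % 16 := Int.emod_nonneg _ (by norm_num)
  have h2 : x / 16 % 16 < 16 := Int.emod_lt_of_pos _ (by norm_num)
  generalize x / 16 % 16 = n at h1 h2 ⊢
  interval_cases n <;> norm_num <;>
    first
      | (rw [show PySem.List.pyGetD rbT1 (0:Int) 0 = (0:Int) from by decide, PySem.Int.bxor_zero])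
      | (exact congrArg (PySem.Int.bxor r) (by decide))
      | (rw [rb_assoc2 r (by norm_num) (by norm_num)]; exact congrArg (PySem.Int.bxor r) (by decide))
      | (rw [rb_assoc3 r (by norm_num) (by norm_num) (by norm_num)]; exact congrArg (PySem.Int.bxor r) (by decide))
      | (rw [rb_assoc4 r (by norm_num) (by norm_num) (by norm_num) (by norm_num)]; exact congrArg (PySem.Int.bxor r) (by decide))

-- A's steps 8..11 collapse to one lookup in table rbT2
theorem rbChunk2 (x r : Int) :
    ([8,9,10,11] : List Nat).foldl
      (fun (result : Int) (i : Nat) => if PySem.Int.band (x >>> i) 1 ≠ 0 then PySem.Int.bxor result (rbM.getD i 0) else result) r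
    = PySem.Int.bxor r (PySem.List.pyGetD rbT2 (PySem.Int.band (x >>> (8:Nat)) 15) 0) := by
  simp only [List.foldl_cons, List.foldl_nil,
    show rbM.getD 8 0 = (0x1189:Int) from rfl, show rbM.getD 9 0 = (0x2312:Int) from rfl, show rbM.getD 10 0 = (0x4624:Int) from rfl, show rbM.getD 11 0 = (0x8c48:Int) from rfl]
  have c0 : PySem.Int.band (x >>> (8:Nat)) 1 = x / 256 % 16 % 2 := by
    rw [PySem.Int.band_one, PySem.Int.mod_eq_emod_of_pos (by norm_num), Int.shiftRight_eq_div_pow,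
        show ((2^8:Nat):Int) = 256 from by norm_num]
    omega
  have c1 : PySem.Int.band (x >>> (9:Nat)) 1 = x / 256 % 16 / 2 % 2 := by
    rw [PySem.Int.band_one, PySem.Int.mod_eq_emod_of_pos (by norm_num), Int.shiftRight_eq_div_pow,
        show ((2^9:Nat):Int) = 512 from by norm_num]
    omega
  have c2 : PySem.Int.band (x >>> (10:Nat)) 1 = x / 256 % 16 / 4 % 2 := by
    rw [PySem.Int.band_one, PySem.Int.mod_eq_emod_of_pos (by norm_num), Int.shiftRight_eq_div_pow,
        show ((2^10:Nat):Int) = 1024 from by norm_num]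
    omega
  have c3 : PySem.Int.band (x >>> (11:Nat)) 1 = x / 256 % 16 / 8 % 2 := by
    rw [PySem.Int.band_one, PySem.Int.mod_eq_emod_of_pos (by norm_num), Int.shiftRight_eq_div_pow,
        show ((2^11:Nat):Int) = 2048 from by norm_num]
    omega
  have ci : PySem.Int.band (x >>> (8:Nat)) 15 = x / 256 % 16 := by
    rw [Int.shiftRight_eq_div_pow, show ((2^8:Nat):Int) = 256 from by norm_num, rb_band15]
  simp only [c0, c1, c2, c3, ci]
  have h1 : 0 ≤ x / 256 % 16 := Int.emod_nonneg _ (by norm_num)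
  have h2 : x / 256 % 16 < 16 := Int.emod_lt_of_pos _ (by norm_num)
  generalize x / 256 % 16 = n at h1 h2 ⊢
  interval_cases n <;> norm_num <;>
    first
      | (rw [show PySem.List.pyGetD rbT2 (0:Int) 0 = (0:Int) from by decide, PySem.Int.bxor_zero])
      | (exact congrArg (PySem.Int.bxor r) (by decide))
      | (rw [rb_assoc2 r (by norm_num) (by norm_num)]; exact congrArg (PySem.Int.bxor r) (by decide))
      | (rw [rb_assoc3 r (by norm_num) (by norm_num) (by norm_num)]; exact congrArg (PySem.Int.bxor r) (by decide))
      | (rw [rb_assoc4 r (by norm_num) (by norm_num) (by norm_num) (by norm_num)]; exact congrArg (PySem.Int.bxor r) (by decide))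

-- A's steps 12..15 collapse to one lookup in table rbT3
theorem rbChunk3 (x r : Int) :
    ([12,13,14,15] : List Nat).foldl
      (fun (result : Int) (i : Nat) => if PySem.Int.band (x >>> i) 1 ≠ 0 then PySem.Int.bxor result (rbM.getD i 0) else result) r
    = PySem.Int.bxor r (PySem.List.pyGetD rbT3 (PySem.Int.band (x >>> (12:Nat)) 15) 0) := by
  simp only [List.foldl_cons, List.foldl_nil,
    show rbM.getD 12 0 = (0x1081:Int) from rfl, show rbM.getD 13 0 = (0x2102:Int) from rfl, show rbM.getD 14 0 = (0x4204:Int) from rfl, show rbM.getD 15 0 = (0x8408:Int) from rfl]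
  have c0 : PySem.Int.band (x >>> (12:Nat)) 1 = x / 4096 % 16 % 2 := by
    rw [PySem.Int.band_one, PySem.Int.mod_eq_emod_of_pos (by norm_num), Int.shiftRight_eq_div_pow,
        show ((2^12:Nat):Int) = 4096 from by norm_num]
    omega
  have c1 : PySem.Int.band (x >>> (13:Nat)) 1 = x / 4096 % 16 / 2 % 2 := by
    rw [PySem.Int.band_one, PySem.Int.mod_eq_emod_of_pos (by norm_num), Int.shiftRight_eq_div_pow,
        show ((2^13:Nat):Int) = 8192 from by norm_num]
    omega
  have c2 : PySem.Int.band (x >>> (14:Nat)) 1 = x / 4096 % 16 / 4 % 2 := by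
    rw [PySem.Int.band_one, PySem.Int.mod_eq_emod_of_pos (by norm_num), Int.shiftRight_eq_div_pow,
        show ((2^14:Nat):Int) = 16384 from by norm_num]
    omega
  have c3 : PySem.Int.band (x >>> (15:Nat)) 1 = x / 4096 % 16 / 8 % 2 := by
    rw [PySem.Int.band_one, PySem.Int.mod_eq_emod_of_pos (by norm_num), Int.shiftRight_eq_div_pow,
        show ((2^15:Nat):Int) = 32768 from by norm_num]
    omega
  have ci : PySem.Int.band (x >>> (12:Nat)) 15 = x / 4096 % 16 := by
    rw [Int.shiftRight_eq_div_pow, show ((2^12:Nat):Int) = 4096 from by norm_num, rb_band15]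
  simp only [c0, c1, c2, c3, ci]
  have h1 : 0 ≤ x / 4096 % 16 := Int.emod_nonneg _ (by norm_num)
  have h2 : x / 4096 % 16 < 16 := Int.emod_lt_of_pos _ (by norm_num)
  generalize x / 4096 % 16 = n at h1 h2 ⊢
  interval_cases n <;> norm_num <;>
    first
      | (rw [show PySem.List.pyGetD rbT3 (0:Int) 0 = (0:Int) from by decide, PySem.Int.bxor_zero])
      | (exact congrArg (PySem.Int.bxor r) (by decide))
      | (rw [rb_assoc2 r (by norm_num) (by norm_num)]; exact congrArg (PySem.Int.bxor r) (by decide))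
      | (rw [rb_assoc3 r (by norm_num) (by norm_num) (by norm_num)]; exact congrArg (PySem.Int.bxor r) (by decide))
      | (rw [rb_assoc4 r (by norm_num) (by norm_num) (by norm_num) (by norm_num)]; exact congrArg (PySem.Int.bxor r) (by decide))

-- ===== VERDICT (by name: the statement is the Claim_ definition above) =====
theorem redundancyBits_spec : Claim_equal_redundancyBits := by
  intro x _
  show redundancyBits x = redundancyBits_alt x
  unfold redundancyBits
  rw [rbMain 16 0x79B4 x 0x19D8, show rbMasks 16 0x19D8 = rbM from rfl,
      show List.range 16 = ([0,1,2,3] : List Nat) ++ (([4,5,6,7] : List Nat) ++ (([8,9,10,11] : List Nat) ++ ([12,13,14,15] : List Nat))) from rfl,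
      List.foldl_append, List.foldl_append, List.foldl_append,
      rbChunk0, rbChunk1, rbChunk2, rbChunk3]
  rfl
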